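-- pv_equiv track=rewrite | github.com/zhengweix/leetcode2 | turo-4.1343.numOfSubarrays.py | numOfSubarrays1
-- ===== SOURCE A (Python) =====
-- def numOfSubarrays1(arr, k, threshold):
--     ans, winSum = 0, 0
--     for winEnd, v in enumerate(arr):
--         winSum += v
--         if winEnd >= k:
--             winSum -= arr[winEnd-k]
--         if winEnd >= k-1 and winSum >= threshold*k:
--             ans += 1
--     return ans
-- ===== SOURCE B (Python) =====
-- def numOfSubarrays1(arr, k, threshold):
--     pre = [0]
--     for v in arr:
--         pre.append(pre[-1] + v)
--     ans = 0
--     for i in range(len(arr) - k + 1):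
--         if pre[i + k] - pre[i] >= threshold * k:
--             ans += 1
--     return ans
-- ===== Notes on version B (the rewrite author's own statement) =====
-- stated objective: alternative
-- what changed: Replaces the rolling add/subtract sliding-window sum with a precomputed prefix-sum table consumed by a separate window-start pass.
-- outside the precondition, e.g. on numOfSubarrays1([1, 2], 0, 0): A returns 2, B returns 3; on numOfSubarrays1([], -1, 0): A returns 0, B raises IndexError
import Mathlib
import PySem

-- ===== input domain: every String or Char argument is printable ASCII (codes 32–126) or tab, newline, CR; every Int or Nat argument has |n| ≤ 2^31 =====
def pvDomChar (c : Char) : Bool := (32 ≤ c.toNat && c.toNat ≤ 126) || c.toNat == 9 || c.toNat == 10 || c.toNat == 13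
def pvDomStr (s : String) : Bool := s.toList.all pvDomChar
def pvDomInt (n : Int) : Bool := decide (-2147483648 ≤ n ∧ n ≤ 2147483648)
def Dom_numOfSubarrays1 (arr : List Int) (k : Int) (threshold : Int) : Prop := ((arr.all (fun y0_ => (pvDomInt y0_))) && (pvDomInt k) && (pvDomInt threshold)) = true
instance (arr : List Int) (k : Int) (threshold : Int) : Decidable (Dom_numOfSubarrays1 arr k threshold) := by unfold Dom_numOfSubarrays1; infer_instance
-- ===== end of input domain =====

-- Program B replaces A's rolling add/subtract window sum with a prefix-sum table
-- consumed by a separate window-start pass (objective: alternative; same cost).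


-- ===== PORT A =====
def numOfSubarrays1 (arr : List Int) (k : Int) (threshold : Int) : Int :=
  ((PySem.List.enumerate arr).foldl (fun (st : Int × Int) (p : Int × Int) =>
    let winSum := st.2 + p.2
    let winSum := if k ≤ p.1 then winSum - PySem.List.pyGetD arr (p.1 - k) 0 else winSum
    let ans := if k - 1 ≤ p.1 ∧ threshold * k ≤ winSum then st.1 + 1 else st.1
    (ans, winSum)) (0, 0)).1

-- ===== PORT B =====
def numOfSubarrays1_alt (arr : List Int) (k : Int) (threshold : Int) : Int :=
  let pre := arr.foldl (fun acc v => acc ++ [PySem.List.pyGetD acc (-1) 0 + v]) [0]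
  (PySem.List.pyRange 0 ((arr.length : Int) - k + 1) 1).foldl
    (fun ans i =>
      if threshold * k ≤ PySem.List.pyGetD pre (i + k) 0 - PySem.List.pyGetD pre i 0
      then ans + 1 else ans) 0

-- ===== PRECONDITION & SPEC =====
-- Pre_ requires k ≥ 1 (a positive window length, the problem's natural domain): for k < 0
-- A raises IndexError on any nonempty arr, and for k = 0 the count of length-0 windows is
-- unspecified — A returns len(arr) and B len(arr)+1, both defensible.
def Pre_numOfSubarrays1 (arr : List Int) (k : Int) (threshold : Int) : Prop := 1 ≤ k
instance (arr : List Int) (k : Int) (threshold : Int) : Decidable (Pre_numOfSubarrays1 arr k threshold) := by unfold Pre_numOfSubarrays1; infer_instance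
def pvWitness_numOfSubarrays1 : List Int × Int × Int := ([2, 1, 3], 2, 1)
def Spec_numOfSubarrays1 (arr : List Int) (k : Int) (threshold : Int) (out : Int) : Prop := out = numOfSubarrays1_alt arr k threshold
instance (arr : List Int) (k : Int) (threshold : Int) (out : Int) : Decidable (Spec_numOfSubarrays1 arr k threshold out) := by unfold Spec_numOfSubarrays1; infer_instance

-- ===== CLAIM (what is proved, stated in full; the proofs are below) =====
def Claim_equal_numOfSubarrays1 : Prop := ∀ (arr : List Int) (k : Int) (threshold : Int), Dom_numOfSubarrays1 arr k threshold → Pre_numOfSubarrays1 arr k threshold → Spec_numOfSubarrays1 arr k threshold (numOfSubarrays1 arr k threshold)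

-- ===== LEMMAS AND PROOFS =====

-- prefix sum of the first j elements
def pvP (arr : List Int) (j : Nat) : Int := (arr.take j).sum

-- the tail of B's prefix-sum list, starting from running sum s
def pvScan (s : Int) : List Int → List Int
  | [] => []
  | v :: vs => (s + v) :: pvScan (s + v) vs

-- the common counting spec: windows counted by their end position m (0-based)
def pvCountA (arr : List Int) (k threshold : Int) : Nat :=
  (List.range arr.length).countP
    (fun (m : Nat) => decide (k ≤ (m : Int) + 1 ∧ threshold * k ≤ pvP arr (m + 1) - pvP arr (m + 1 - k.toNat)))

theorem pvP_succ (xs : List Int) (j : Nat) (hj : j < xs.length) :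
    pvP xs (j + 1) = pvP xs j + xs[j] := by
  rw [pvP, pvP, List.take_add_one, List.sum_append]
  simp [List.getElem?_eq_getElem hj]

theorem pvP_append_le (xs : List Int) (x : Int) (j : Nat) (hj : j ≤ xs.length) :
    pvP (xs ++ [x]) j = pvP xs j := by
  simp [pvP, List.take_append_of_le_length hj]

theorem pvScan_spec (arr : List Int) (s : Int) :
    pvScan s arr = (List.range arr.length).map (fun j => s + pvP arr (j + 1)) := by
  induction arr generalizing s with
  | nil => simp [pvScan]
  | cons v vs ih =>
    simp only [pvScan, ih (s + v), List.length_cons, List.range_succ_eq_map,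
      List.map_cons, List.map_map, List.cons.injEq]
    refine ⟨by simp [pvP], ?_⟩
    apply List.map_congr_left
    intro j _
    simp [pvP, Function.comp, List.take_succ_cons]
    ring

theorem pre_gen (arr : List Int) (acc : List Int) (h : acc ≠ []) :
    arr.foldl (fun a v => a ++ [PySem.List.pyGetD a (-1) 0 + v]) acc
      = acc ++ pvScan (acc.getLast h) arr := by
  induction arr generalizing acc with
  | nil => simp [pvScan]
  | cons v vs ih =>
    rw [List.foldl_cons, ih (acc ++ [PySem.List.pyGetD acc (-1) 0 + v]) (by simp),
      PySem.List.pyGetD_neg_one acc 0 h]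
    simp [pvScan]

theorem pre_spec (arr : List Int) :
    arr.foldl (fun a v => a ++ [PySem.List.pyGetD a (-1) 0 + v]) [0]
      = 0 :: pvScan 0 arr := by
  have := pre_gen arr [0] (by simp)
  simpa using this

theorem pre_get (arr : List Int) (j : Nat) (hj : j ≤ arr.length) :
    (0 :: pvScan 0 arr).getD j 0 = pvP arr j := by
  cases j with
  | zero => simp [pvP]
  | succ j =>
    rw [List.getD_cons_succ, pvScan_spec]
    have hj' : j < arr.length := by omega
    simp [List.getD_eq_getElem?_getD, List.getElem?_range hj']

theorem count_shift (n K : Nat) (hK : 1 ≤ K) (q : Nat → Bool) :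
    (List.range n).countP (fun m => decide (K ≤ m + 1) && q (m + 1 - K))
      = (List.range (n + 1 - K)).countP q := by
  by_cases h : K - 1 ≤ n
  · have hn : n = (K - 1) + (n + 1 - K) := by omega
    conv_lhs => rw [hn]
    rw [List.range_add, List.countP_append, List.countP_map]
    have h0 : (List.range (K - 1)).countP
        (fun m => decide (K ≤ m + 1) && q (m + 1 - K)) = 0 := by
      apply List.countP_eq_zero.mpr
      intro m hm
      simp only [List.mem_range] at hm
      simp [show ¬ (K ≤ m + 1) by omega]
    rw [h0, Nat.zero_add]
    apply List.countP_congr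
    intro j _
    simp only [Function.comp]
    rw [show K - 1 + j + 1 - K = j by omega]
    simp [show K ≤ K - 1 + j + 1 by omega]
  · have h1 : n + 1 - K = 0 := by omega
    rw [h1]
    simp only [List.range_zero, List.countP_nil]
    apply List.countP_eq_zero.mpr
    intro m hm
    simp only [List.mem_range] at hm
    simp [show ¬ (K ≤ m + 1) by omega]

theorem pvCountA_eq (arr : List Int) (k threshold : Int) (hk : 1 ≤ k) :
    pvCountA arr k threshold
      = (List.range (arr.length + 1 - k.toNat)).countP
          (fun j => decide (threshold * k ≤ pvP arr (j + k.toNat) - pvP arr j)) := by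
  have hK : 1 ≤ k.toNat := by omega
  rw [← count_shift arr.length k.toNat hK]
  unfold pvCountA
  apply List.countP_congr
  intro m _
  by_cases hKm : k.toNat ≤ m + 1
  · have hs : m + 1 - k.toNat + k.toNat = m + 1 := by omega
    have h1 : (k ≤ (m : Int) + 1) ↔ (k.toNat ≤ m + 1) := by omega
    rw [Bool.decide_and, decide_eq_decide.mpr h1, hs]
  · simp [show ¬ (k ≤ (m : Int) + 1) by omega, hKm]

theorem ansStep (xs : List Int) (x : Int) (k threshold : Int) (hk : 1 ≤ k) :
    (if k - 1 ≤ (xs.length : Int) ∧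
        threshold * k ≤ pvP (xs ++ [x]) (xs.length + 1) - pvP (xs ++ [x]) (xs.length + 1 - k.toNat)
     then (pvCountA xs k threshold : Int) + 1 else (pvCountA xs k threshold : Int))
      = (pvCountA (xs ++ [x]) k threshold : Int) := by
  unfold pvCountA
  rw [List.length_append, List.length_singleton, List.range_succ, List.countP_append]
  have hpref : (List.range xs.length).countP
      (fun (m : Nat) => decide (k ≤ (m : Int) + 1 ∧
        threshold * k ≤ pvP (xs ++ [x]) (m + 1) - pvP (xs ++ [x]) (m + 1 - k.toNat)))
      = (List.range xs.length).countP
      (fun (m : Nat) => decide (k ≤ (m : Int) + 1 ∧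
        threshold * k ≤ pvP xs (m + 1) - pvP xs (m + 1 - k.toNat))) := by
    apply List.countP_congr
    intro m hm
    simp only [List.mem_range] at hm
    simp only [pvP_append_le xs x (m + 1) (by omega),
      pvP_append_le xs x (m + 1 - k.toNat) (by omega)]
  rw [hpref]
  have hiff : (k - 1 ≤ (xs.length : Int) ∧
      threshold * k ≤ pvP (xs ++ [x]) (xs.length + 1) - pvP (xs ++ [x]) (xs.length + 1 - k.toNat))
      ↔ (k ≤ (xs.length : Int) + 1 ∧
      threshold * k ≤ pvP (xs ++ [x]) (xs.length + 1) - pvP (xs ++ [x]) (xs.length + 1 - k.toNat)) := by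
    constructor <;> exact fun h => ⟨by omega, h.2⟩
  split_ifs with h
  · rw [hiff] at h
    simp [h]
  · rw [hiff] at h
    simp [h]

theorem foldA (arr : List Int) (rest : List Int) (k threshold : Int) (hk : 1 ≤ k) :
    (PySem.List.enumerate arr).foldl (fun (st : Int × Int) (p : Int × Int) =>
      let winSum := st.2 + p.2
      let winSum := if k ≤ p.1 then winSum - PySem.List.pyGetD (arr ++ rest) (p.1 - k) 0 else winSum
      let ans := if k - 1 ≤ p.1 ∧ threshold * k ≤ winSum then st.1 + 1 else st.1
      (ans, winSum)) (0, 0)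
      = ((pvCountA arr k threshold : Int),
         pvP arr arr.length - pvP arr (arr.length - k.toNat)) := by
  induction arr using List.reverseRecOn generalizing rest with
  | nil => simp [PySem.List.enumerate_nil, pvCountA, pvP]
  | append_singleton xs x ih =>
    rw [PySem.List.enumerate_append, List.foldl_append, List.append_assoc,
      ih ([x] ++ rest),
      PySem.List.enumerate_cons, PySem.List.enumerate_nil,
      List.foldl_cons, List.foldl_nil]
    dsimp only
    simp only [zero_add]
    have hlen : (xs ++ [x]).length = xs.length + 1 := by simp
    have hful : pvP (xs ++ [x]) (xs.length + 1) = pvP xs xs.length + x := by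
      unfold pvP
      rw [List.take_of_length_le (by simp), List.take_length, List.sum_append]
      simp
    by_cases hkn : k ≤ (xs.length : Int)
    · have hK1 : k.toNat ≤ xs.length := by omega
      have hidx : (xs.length : Int) - k = ((xs.length - k.toNat : Nat) : Int) := by
        omega
      have hget : PySem.List.pyGetD (xs ++ ([x] ++ rest)) ((xs.length : Int) - k) 0
          = xs[xs.length - k.toNat]'(by omega) := by
        rw [hidx, PySem.List.pyGetD_natCast, List.getD_eq_getElem?_getD,
          List.getElem?_append_left (by omega), List.getElem?_eq_getElem (by omega)]
        rfl
      have hwin : pvP xs xs.length - pvP xs (xs.length - k.toNat) + x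
            - xs[xs.length - k.toNat]'(by omega)
          = pvP (xs ++ [x]) (xs.length + 1) - pvP (xs ++ [x]) (xs.length + 1 - k.toNat) := by
        rw [hful, pvP_append_le xs x (xs.length + 1 - k.toNat) (by omega),
          show xs.length + 1 - k.toNat = (xs.length - k.toNat) + 1 by omega,
          pvP_succ xs (xs.length - k.toNat) (by omega)]
        ring
      rw [if_pos hkn, hget, hwin, hlen, ansStep xs x k threshold hk]
    · have hK0 : xs.length - k.toNat = 0 := by omega
      have hK0' : xs.length + 1 - k.toNat = 0 := by omega
      have hwin : pvP xs xs.length - pvP xs (xs.length - k.toNat) + x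
          = pvP (xs ++ [x]) (xs.length + 1) - pvP (xs ++ [x]) (xs.length + 1 - k.toNat) := by
        rw [hful, hK0, hK0']
        simp [pvP]
      rw [if_neg hkn, hwin, hlen, ansStep xs x k threshold hk]

theorem portA_spec (arr : List Int) (k threshold : Int) (hk : 1 ≤ k) :
    numOfSubarrays1 arr k threshold = (pvCountA arr k threshold : Int) := by
  unfold numOfSubarrays1
  have h := foldA arr [] k threshold hk
  simp only [List.append_nil] at h
  rw [h]

theorem portB_spec (arr : List Int) (k threshold : Int) (hk : 1 ≤ k) :
    numOfSubarrays1_alt arr k threshold = (pvCountA arr k threshold : Int) := by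
  unfold numOfSubarrays1_alt
  rw [pre_spec, PySem.List.pyRange_one, List.foldl_map,
    PySem.List.foldl_ite_add_one
      (fun (j : Nat) => threshold * k ≤ PySem.List.pyGetD (0 :: pvScan 0 arr) (0 + (j : Int) + k) 0
                  - PySem.List.pyGetD (0 :: pvScan 0 arr) (0 + (j : Int)) 0),
    pvCountA_eq arr k threshold hk, Int.zero_add]
  norm_cast
  have hM : (((arr.length : Int) - k + 1) - 0).toNat = arr.length + 1 - k.toNat := by omega
  rw [hM]
  apply List.countP_congr
  intro j hj
  simp only [List.mem_range] at hj
  have hjk : j + k.toNat ≤ arr.length := by omega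
  have e1 : (j : Int) + k = ((j + k.toNat : Nat) : Int) := by push_cast; omega
  simp only [Nat.zero_add, e1, PySem.List.pyGetD_natCast,
    pre_get arr (j + k.toNat) hjk, pre_get arr j (by omega)]

-- ===== VERDICT (by name: the statement is the Claim_ definition above) =====
theorem numOfSubarrays1_spec : Claim_equal_numOfSubarrays1 := by
  intro arr k threshold _ hk
  unfold Spec_numOfSubarrays1
  rw [portA_spec arr k threshold hk, portB_spec arr k threshold hk]
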